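-- pv_equiv track=rewrite | github.com/bhks/grafana-client | examples/plugin-install.py | filter_by_attributes_inclusion_exclusion
-- ===== SOURCE A (Python) =====
-- def filter_by_attributes_inclusion_exclusion(items, attributes_to_include, attributes_to_exclude):
--     filtered_items = items
--     if attributes_to_include:
--         for attribute, values in attributes_to_include.items():
--             filtered_items = [item for item in filtered_items if item.get(attribute) in values]
--     if attributes_to_exclude:
--         for attribute, values in attributes_to_exclude.items():
--             filtered_items = [item for item in filtered_items if item.get(attribute) not in values]
--     return filtered_items
-- ===== SOURCE B (Python) =====
-- def filter_by_attributes_inclusion_exclusion(items, attributes_to_include, attributes_to_exclude):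
--     # Normalise both dicts into ONE tagged criteria list: (attribute, values, want_membership).
--     criteria = [(a, vs, True) for a, vs in (attributes_to_include or {}).items()]
--     criteria += [(a, vs, False) for a, vs in (attributes_to_exclude or {}).items()]
--
--     def satisfies(item, crits):
--         if not crits:
--             return True
--         attr, values, want = crits[0]
--         return ((item.get(attr) in values) == want) and satisfies(item, crits[1:])
--
--     out = []
--     for item in items:
--         if satisfies(item, criteria):
--             out.append(item)
--     return out
-- ===== Notes on version B (the rewrite author's own statement) =====
-- stated objective: alternative
-- what changed: Merges both dicts into one tagged criteria list (attribute, values, want_membership), checks it with a recursive per-item satisfies helper, and builds the result in a single accumulator loop over items instead of A's one full filtering pass per criterion.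
import Mathlib
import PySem

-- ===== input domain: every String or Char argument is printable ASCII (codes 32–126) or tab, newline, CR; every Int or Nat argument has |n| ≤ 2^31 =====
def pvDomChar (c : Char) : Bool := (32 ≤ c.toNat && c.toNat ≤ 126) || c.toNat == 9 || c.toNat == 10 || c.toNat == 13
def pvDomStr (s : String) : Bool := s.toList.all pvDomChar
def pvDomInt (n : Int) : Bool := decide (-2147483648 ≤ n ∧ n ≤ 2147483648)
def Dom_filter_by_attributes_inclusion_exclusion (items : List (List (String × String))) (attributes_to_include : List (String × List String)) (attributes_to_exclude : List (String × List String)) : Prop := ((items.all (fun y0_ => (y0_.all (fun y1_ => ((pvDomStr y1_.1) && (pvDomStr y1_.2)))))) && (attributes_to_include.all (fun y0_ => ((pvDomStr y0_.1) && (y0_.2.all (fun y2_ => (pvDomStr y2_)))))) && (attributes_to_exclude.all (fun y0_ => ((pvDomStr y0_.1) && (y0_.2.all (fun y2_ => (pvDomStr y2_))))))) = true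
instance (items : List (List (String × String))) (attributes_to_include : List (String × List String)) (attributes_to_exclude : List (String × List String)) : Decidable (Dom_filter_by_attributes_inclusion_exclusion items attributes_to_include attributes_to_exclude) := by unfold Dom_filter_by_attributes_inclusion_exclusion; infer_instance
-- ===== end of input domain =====

-- B merges both criteria dicts into one tagged criteria list and collects the kept items by
-- a single accumulator loop over a recursive per-item criteria check, instead of A's one full filtering pass per criterion;
-- same return value. (When both criteria dicts are empty A returns the input list object
-- itself; only the return VALUE is compared here.)

-- ===== PORT A =====
-- item.get(attribute): first-match lookup in the item's association list (dict semantics)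
def pvItemGet (item : List (String × String)) (attr : String) : Option String :=
  (PySem.Dict.mk item).get? attr

-- `item.get(attribute) in values` (None is never in a list of strings)
def pvIncOk (attr : String) (values : List String) (item : List (String × String)) : Bool :=
  match pvItemGet item attr with
  | some v => values.contains v
  | none => false

def filter_by_attributes_inclusion_exclusion (items : List (List (String × String))) (attributes_to_include : List (String × List String)) (attributes_to_exclude : List (String × List String)) : List (List (String × String)) :=
  -- filtered_items = items; one filtering pass per criterion, guarded by truthiness
  let filtered₁ :=
    if attributes_to_include.isEmpty then items
    else attributes_to_include.foldl
      (fun filtered_items p => filtered_items.filter (fun item => pvIncOk p.1 p.2 item)) items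
  if attributes_to_exclude.isEmpty then filtered₁
  else attributes_to_exclude.foldl
    (fun filtered_items p => filtered_items.filter (fun item => !(pvIncOk p.1 p.2 item))) filtered₁

-- ===== PORT B =====
-- satisfies(item, crits): recursive check of the tagged criteria list;
-- `(item.get(attr) in values) == want`
def pvSatisfies (item : List (String × String)) : List (String × List String × Bool) → Bool
  | [] => true
  | c :: t =>
    (((match (PySem.Dict.mk item).get? c.1 with
       | some v => c.2.1.contains v
       | none => false) : Bool) == c.2.2) && pvSatisfies item t

-- out = []; for item in items: if satisfies(item, criteria): out.append(item)
def pvCollect (criteria : List (String × List String × Bool)) (items : List (List (String × String))) : List (List (String × String)) :=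
  items.foldl (fun out item => if pvSatisfies item criteria then out ++ [item] else out) []

def filter_by_attributes_inclusion_exclusion_alt (items : List (List (String × String))) (attributes_to_include : List (String × List String)) (attributes_to_exclude : List (String × List String)) : List (List (String × String)) :=
  let criteria :=
    attributes_to_include.map (fun p => (p.1, p.2, true))
      ++ attributes_to_exclude.map (fun p => (p.1, p.2, false))
  pvCollect criteria items

-- ===== PRECONDITION & SPEC =====
def Spec_filter_by_attributes_inclusion_exclusion (items : List (List (String × String))) (attributes_to_include : List (String × List String)) (attributes_to_exclude : List (String × List String)) (out : List (List (String × String))) : Prop := out = filter_by_attributes_inclusion_exclusion_alt items attributes_to_include attributes_to_exclude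
instance (items : List (List (String × String))) (attributes_to_include : List (String × List String)) (attributes_to_exclude : List (String × List String)) (out : List (List (String × String))) : Decidable (Spec_filter_by_attributes_inclusion_exclusion items attributes_to_include attributes_to_exclude out) := by unfold Spec_filter_by_attributes_inclusion_exclusion; infer_instance

-- ===== CLAIM (what is proved, stated in full; the proofs are below) =====
def Claim_equal_filter_by_attributes_inclusion_exclusion : Prop := ∀ (items : List (List (String × String))) (attributes_to_include : List (String × List String)) (attributes_to_exclude : List (String × List String)), Dom_filter_by_attributes_inclusion_exclusion items attributes_to_include attributes_to_exclude → Spec_filter_by_attributes_inclusion_exclusion items attributes_to_include attributes_to_exclude (filter_by_attributes_inclusion_exclusion items attributes_to_include attributes_to_exclude)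

-- ===== LEMMAS AND PROOFS =====

-- the appending accumulator loop is a filter by the criteria checker
theorem pvCollect_eq_filter (criteria : List (String × List String × Bool)) :
    ∀ xs, pvCollect criteria xs = xs.filter (fun x => pvSatisfies x criteria) := by
  intro xs
  unfold pvCollect
  rw [PySem.List.foldl_append_if_eq_filter]
  simp

-- the checker over an appended criteria list splits conjunctively
theorem pvSatisfies_append (item : List (String × String)) :
    ∀ (p q : List (String × List String × Bool)),
      pvSatisfies item (p ++ q) = (pvSatisfies item p && pvSatisfies item q) := by
  intro p q
  induction p with
  | nil => simp [pvSatisfies]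
  | cons c t ih => simp [pvSatisfies, ih, Bool.and_assoc]

-- the checker on a mapped criteria list vs. the per-criterion predicate of A's port
theorem pvSatisfies_map (item : List (String × String)) (want : Bool) :
    ∀ (l : List (String × List String)),
      pvSatisfies item (l.map (fun p => (p.1, p.2, want)))
        = l.all (fun p => pvIncOk p.1 p.2 item == want) := by
  intro l
  induction l with
  | nil => rfl
  | cons c t ih => simp [pvSatisfies, ih, pvIncOk, pvItemGet]

-- a sequence of filtering passes, one per criterion, equals a single filter with all criteria
theorem pv_foldl_filter {α β : Type} (pred : β → α → Bool) :
    ∀ (ps : List β) (xs : List α),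
      ps.foldl (fun fs p => fs.filter (fun x => pred p x)) xs
        = xs.filter (fun x => ps.all (fun p => pred p x)) := by
  intro ps
  induction ps with
  | nil => intro xs; simp
  | cons p t ih =>
    intro xs
    simp only [List.foldl_cons, ih, List.filter_filter, List.all_cons]
    exact List.filter_congr (fun x _ => Bool.and_comm _ _)

theorem filter_by_attributes_inclusion_exclusion_eq (items : List (List (String × String))) (attributes_to_include : List (String × List String)) (attributes_to_exclude : List (String × List String)) :
    filter_by_attributes_inclusion_exclusion items attributes_to_include attributes_to_exclude
      = filter_by_attributes_inclusion_exclusion_alt items attributes_to_include attributes_to_exclude := by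
  unfold filter_by_attributes_inclusion_exclusion filter_by_attributes_inclusion_exclusion_alt
  rw [pvCollect_eq_filter]
  have hpred : ∀ item,
      pvSatisfies item (attributes_to_include.map (fun p => (p.1, p.2, true))
          ++ attributes_to_exclude.map (fun p => (p.1, p.2, false)))
        = (attributes_to_include.all (fun p => pvIncOk p.1 p.2 item)
            && attributes_to_exclude.all (fun p => !(pvIncOk p.1 p.2 item))) := by
    intro item
    rw [pvSatisfies_append, pvSatisfies_map, pvSatisfies_map]
    congr 1
    · exact congrArg _ (funext fun p => by cases pvIncOk p.1 p.2 item <;> rfl)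
    · exact congrArg _ (funext fun p => by cases pvIncOk p.1 p.2 item <;> rfl)
  have h1 : (if attributes_to_include.isEmpty then items
      else attributes_to_include.foldl
        (fun filtered_items p => filtered_items.filter (fun item => pvIncOk p.1 p.2 item)) items)
      = items.filter (fun item => attributes_to_include.all (fun p => pvIncOk p.1 p.2 item)) := by
    cases attributes_to_include with
    | nil => simp
    | cons p t =>
      simp [pv_foldl_filter]
      exact List.filter_congr (fun x _ => Bool.and_comm _ _)
  rw [h1]
  cases attributes_to_exclude with
  | nil =>
    refine List.filter_congr (fun x _ => ?_)
    rw [hpred x]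
    simp
  | cons q s =>
    simp only [List.isEmpty_cons, Bool.false_eq_true, if_false, pv_foldl_filter,
      List.filter_filter]
    refine List.filter_congr (fun x _ => ?_)
    rw [hpred x]
    cases hinc : (attributes_to_include.all fun p => pvIncOk p.1 p.2 x) <;>
      cases hq : pvIncOk q.1 q.2 x <;>
        cases hs : (s.all fun p => !pvIncOk p.1 p.2 x) <;>
          simp [List.all_cons, hs]

-- ===== VERDICT (by name: the statement is the Claim_ definition above) =====
theorem filter_by_attributes_inclusion_exclusion_spec : Claim_equal_filter_by_attributes_inclusion_exclusion := by
  intro items inc exc _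
  unfold Spec_filter_by_attributes_inclusion_exclusion
  exact filter_by_attributes_inclusion_exclusion_eq items inc exc
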